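-- pv_equiv track=rewrite | github.com/andychen3/Launch-School | py110/small_problems_110_119/practice_interview_qs/8.py | signed_integer_to_string
-- ===== SOURCE A (Python) =====
-- def signed_integer_to_string(num):
--     if num == 0:
--         return "0"
--     positive = True if num >= 0 else False
--     number = abs(num)
--     res = []
--
--     while number:
--         remainder = number % 10
--         res.append(chr(remainder + 48))
--         number //= 10
--
--     if positive:
--         res.append("+")
--     else:
--         res.append("-")
--
--     return "".join(res[::-1])
-- ===== SOURCE B (Python) =====
-- def signed_integer_to_string(num):
--     if num == 0:
--         return "0"
--     return ("+" if num > 0 else "-") + str(abs(num))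
-- ===== Notes on version B (the rewrite author's own statement) =====
-- stated objective: idiomatic
-- what changed: Replaced the manual modulo-ten/divide-by-ten digit loop with char arithmetic, list accumulator and reversal by a sign prefix concatenated with Python's built-in str(abs(num)).
import Mathlib
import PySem

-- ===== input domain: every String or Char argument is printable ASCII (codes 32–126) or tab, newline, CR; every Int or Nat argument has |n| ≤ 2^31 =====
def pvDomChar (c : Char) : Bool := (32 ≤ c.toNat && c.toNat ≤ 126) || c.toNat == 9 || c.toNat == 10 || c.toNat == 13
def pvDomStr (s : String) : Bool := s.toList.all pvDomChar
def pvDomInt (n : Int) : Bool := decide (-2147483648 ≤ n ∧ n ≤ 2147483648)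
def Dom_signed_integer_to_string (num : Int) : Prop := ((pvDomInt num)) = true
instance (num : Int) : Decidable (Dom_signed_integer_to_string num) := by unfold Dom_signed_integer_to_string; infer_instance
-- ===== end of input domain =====

-- B replaces A's manual modulo-ten digit loop (char arithmetic, accumulator list, reversal)
-- by a sign prefix concatenated with the built-in decimal conversion str(abs(num)); objective: idiomatic.


-- ===== PORT A =====
-- the 'while number:' loop: number is |num| (a Nat, so floor-division and remainder are Nat div/mod);
-- res collects chr(remainder + 48) by appending at the end, exactly as A does
def pvWhileA (number : Nat) (res : List Char) : List Char :=
  if h : number = 0 then res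
  else pvWhileA (number / 10) (res ++ [Char.ofNat (number % 10 + 48)])
termination_by number
decreasing_by exact Nat.div_lt_self (Nat.pos_of_ne_zero h) (by norm_num)

-- "".join of one-character strings over res[::-1] = String.ofList of the reversed char list (exact)
def signed_integer_to_string (num : Int) : String :=
  if num = 0 then "0"
  else
    let positive : Bool := if num ≥ 0 then true else false
    let number := num.natAbs
    let res := pvWhileA number []
    let res := res ++ [if positive then '+' else '-']
    String.ofList res.reverse

-- ===== PORT B =====
def signed_integer_to_string_alt (num : Int) : String :=
  if num = 0 then "0"
  else (if num > 0 then "+" else "-") ++ PySem.Int.toStr |num|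

-- ===== PRECONDITION & SPEC =====
def Spec_signed_integer_to_string (num : Int) (out : String) : Prop := out = signed_integer_to_string_alt num
instance (num : Int) (out : String) : Decidable (Spec_signed_integer_to_string num out) := by unfold Spec_signed_integer_to_string; infer_instance

-- ===== CLAIM (what is proved, stated in full; the proofs are below) =====
def Claim_equal_signed_integer_to_string : Prop := ∀ (num : Int), Dom_signed_integer_to_string num → Spec_signed_integer_to_string num (signed_integer_to_string num)

-- ===== LEMMAS AND PROOFS =====

-- low-to-high digits of n, the list A's loop builds (starting from an empty accumulator)
def digitsLo (n : Nat) : List Char :=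
  if h : n = 0 then []
  else Char.ofNat (n % 10 + 48) :: digitsLo (n / 10)
termination_by n
decreasing_by exact Nat.div_lt_self (Nat.pos_of_ne_zero h) (by norm_num)

theorem pvWhileA_eq (n : Nat) : ∀ res, pvWhileA n res = res ++ digitsLo n := by
  induction n using Nat.strong_induction_on with
  | _ n ih =>
    intro res
    rw [pvWhileA, digitsLo]
    by_cases h : n = 0
    · simp [h]
    · rw [dif_neg h, dif_neg h,
        ih (n / 10) (Nat.div_lt_self (Nat.pos_of_ne_zero h) (by norm_num))]
      simp

theorem digitChar_eq (m : Nat) (h : m < 10) : Nat.digitChar m = Char.ofNat (m + 48) := by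
  interval_cases m <;> rfl

theorem toDigitsCore_eq (fuel : Nat) : ∀ n ds, n < fuel → 0 < n →
    Nat.toDigitsCore 10 fuel n ds = (digitsLo n).reverse ++ ds := by
  induction fuel with
  | zero => intro n ds h; omega
  | succ f ih =>
    intro n ds h hn
    rw [Nat.toDigitsCore]
    rw [digitChar_eq (n % 10) (Nat.mod_lt _ (by norm_num))]
    by_cases h10 : n / 10 = 0
    · simp only [h10, if_pos]
      rw [digitsLo, dif_neg (show n ≠ 0 by omega), digitsLo, dif_pos h10]
      simp
    · rw [if_neg h10, ih (n / 10) _ (by omega) (Nat.pos_of_ne_zero h10)]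
      conv_rhs => rw [digitsLo, dif_neg (by omega : n ≠ 0)]
      simp

theorem toChars_pos (n : Nat) (hn : 0 < n) :
    PySem.Int.toChars (n : Int) = (digitsLo n).reverse := by
  unfold PySem.Int.toChars
  rw [if_neg (by omega)]
  simp only [Int.toNat_natCast]
  rw [Nat.toDigits, toDigitsCore_eq (n + 1) n [] (by omega) hn, List.append_nil]

-- ===== VERDICT (by name: the statement is the Claim_ definition above) =====
theorem signed_integer_to_string_spec : Claim_equal_signed_integer_to_string := by
  intro num _
  unfold Spec_signed_integer_to_string signed_integer_to_string signed_integer_to_string_alt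
  by_cases h0 : num = 0
  · simp [h0]
  · rw [if_neg h0, if_neg h0]
    simp only []
    have hn : 0 < num.natAbs := Int.natAbs_pos.mpr h0
    rw [pvWhileA_eq, List.nil_append, List.reverse_append]
    unfold PySem.Int.toStr
    rw [Int.abs_eq_natAbs, toChars_pos num.natAbs hn]
    by_cases hpos : num > 0
    · rw [if_pos (show num ≥ 0 by omega), if_pos rfl, if_pos hpos]
      rw [show ("+" : String) = String.ofList ['+'] from rfl, ← String.ofList_append]
      rfl
    · rw [if_neg (show ¬ num ≥ 0 by omega), if_neg (by simp), if_neg hpos]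
      rw [show ("-" : String) = String.ofList ['-'] from rfl, ← String.ofList_append]
      rfl
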